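-- pv_equiv track=rewrite | github.com/yonsweng/ps | codeforces/1602/a.py | solve
-- ===== SOURCE A (Python) =====
-- def solve(s):
--     answer = 0
--
--     answer = min(map(ord, s))
--     a = chr(answer)
--
--     flag = False
--     b = []
--     for si in s:
--         if flag or si != a:
--             b.append(si)
--         elif si == a:
--             flag = True
--
--     return a + ' ' + ''.join(b)
-- ===== SOURCE B (Python) =====
-- def solve(s):
--     a = min(s)
--     i = s.index(a)
--     return a + ' ' + s[:i] + s[i+1:]
-- ===== Notes on version B (the rewrite author's own statement) =====
-- stated objective: simpler
-- what changed: Replaces the flag-driven per-character scan that appends into a list with a direct decomposition: take the minimum character, locate its first index, and splice the string with two slices.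
import Mathlib
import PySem

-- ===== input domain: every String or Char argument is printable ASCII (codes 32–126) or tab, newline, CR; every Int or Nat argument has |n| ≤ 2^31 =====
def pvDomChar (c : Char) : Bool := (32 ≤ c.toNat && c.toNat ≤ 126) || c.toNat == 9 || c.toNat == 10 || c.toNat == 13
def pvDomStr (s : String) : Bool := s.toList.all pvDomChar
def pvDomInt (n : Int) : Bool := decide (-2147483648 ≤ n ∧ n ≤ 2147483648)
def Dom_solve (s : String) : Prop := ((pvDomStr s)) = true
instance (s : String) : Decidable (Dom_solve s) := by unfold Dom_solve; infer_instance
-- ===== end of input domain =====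

-- B replaces A's flag-driven append loop with min + first index + slice splice (objective: simpler).

-- ===== PORT A =====
-- answer = min(map(ord, s)); a = chr(answer); flag loop appending every char except the first 'a'
def solve (s : String) : String :=
  match PySem.List.min? (s.toList.map (fun c => (c.toNat : Int))) (fun x => x) with
  | none => ""   -- unreachable: min([]) raises ValueError, excluded by Pre_solve
  | some answer =>
    let a : Char := Char.ofNat answer.toNat
    let st := s.toList.foldl (fun (p : Bool × List Char) si =>
      if p.1 = true ∨ si ≠ a then (p.1, p.2 ++ [si])
      else if si = a then (true, p.2) else p) (false, ([] : List Char))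
    String.ofList (a :: ' ' :: st.2)

-- ===== PORT B =====
-- a = min(s); i = s.index(a); return a + ' ' + s[:i] + s[i+1:]
def solve_alt (s : String) : String :=
  match PySem.List.min? s.toList (fun c => c) with
  | none => ""   -- unreachable: min('') raises ValueError, excluded by Pre_solve
  | some a =>
    match PySem.List.index? s.toList a with
    | none => ""  -- unreachable: a is an element of s
    | some i =>
      String.ofList (a :: ' ' :: (PySem.List.slice s.toList none (some (i : Int)) ++
                                  PySem.List.slice s.toList (some ((i : Int) + 1)) none))

-- ===== PRECONDITION & SPEC =====
-- Pre_ excludes only the empty string, on which both A and B raise ValueError (min of empty sequence).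
def Pre_solve (s : String) : Prop := s ≠ ""
instance (s : String) : Decidable (Pre_solve s) := by unfold Pre_solve; infer_instance
def pvWitness_solve : String := "ba"
def Spec_solve (s : String) (out : String) : Prop := out = solve_alt s
instance (s : String) (out : String) : Decidable (Spec_solve s out) := by unfold Spec_solve; infer_instance

-- ===== CLAIM (what is proved, stated in full; the proofs are below) =====
def Claim_equal_solve : Prop := ∀ (s : String), Dom_solve s → Pre_solve s → Spec_solve s (solve s)

-- ===== LEMMAS AND PROOFS =====

theorem char_le_iff (c d : Char) : c ≤ d ↔ c.toNat ≤ d.toNat := by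
  rw [Char.le_def, UInt32.le_iff_toNat_le]; rfl

theorem char_toNat_min (c d : Char) : (min c d).toNat = min c.toNat d.toNat := by
  rcases min_cases c d with ⟨h1, h2⟩ | ⟨h1, h2⟩ <;> rw [h1]
  · rw [char_le_iff] at h2; omega
  · rw [← not_le, char_le_iff, not_le] at h2; omega

-- foldl min commutes with the monotone embedding toNat
theorem foldl_min_map (t : List Char) : ∀ x : Char,
    (t.map (fun c => (c.toNat : Int))).foldl min ((x.toNat : Int))
      = ((t.foldl min x).toNat : Int) := by
  induction t with
  | nil => intro x; rfl
  | cons y t ih =>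
    intro x
    simp only [List.map_cons, List.foldl_cons]
    rw [show min ((x.toNat : Int)) ((y.toNat : Int)) = (((min x y).toNat : Int)) by
          rw [char_toNat_min]; push_cast; rfl]
    exact ih (min x y)

-- A's flag loop once the flag is set: every remaining char is appended
theorem loop_true (a : Char) (l : List Char) : ∀ b0 : List Char,
    l.foldl (fun (p : Bool × List Char) si =>
      if p.1 = true ∨ si ≠ a then (p.1, p.2 ++ [si])
      else if si = a then (true, p.2) else p) (true, b0) = (true, b0 ++ l) := by
  induction l with
  | nil => intro b0; simp
  | cons x l ih =>
    intro b0
    simp only [List.foldl_cons]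
    rw [if_pos (Or.inl trivial), ih]; simp

-- A's flag loop from an unset flag removes the first occurrence of a
theorem loop_false (a : Char) (l : List Char) : ∀ b0 : List Char,
    (l.foldl (fun (p : Bool × List Char) si =>
      if p.1 = true ∨ si ≠ a then (p.1, p.2 ++ [si])
      else if si = a then (true, p.2) else p) (false, b0)).2 = b0 ++ l.erase a := by
  induction l with
  | nil => intro b0; simp
  | cons x l ih =>
    intro b0
    by_cases hx : x = a
    · subst hx
      simp only [List.foldl_cons]
      rw [if_neg (by simp), if_pos trivial, loop_true, List.erase_cons_head]
    · simp only [List.foldl_cons, if_pos (Or.inr hx)]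
      rw [ih, List.erase_cons_tail (by simpa using hx)]
      simp

-- B's two slices at the first index of a give the first-occurrence erase
theorem slices_eq_erase (l : List Char) (a : Char) (i : Nat)
    (h : PySem.List.index? l a = some i) :
    PySem.List.slice l none (some (i : Int)) ++ PySem.List.slice l (some ((i : Int) + 1)) none
      = l.erase a := by
  obtain ⟨pre, suf, rfl, hlen, hnotmem⟩ := (PySem.List.index?_eq_some_iff _ _ _).1 h
  rw [PySem.List.slice_to_natCast,
      show ((i : Int) + 1) = ((i + 1 : Nat) : Int) by push_cast; ring,
      PySem.List.slice_from_natCast]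
  subst hlen
  rw [List.take_left, List.erase_append_right _ (by simpa using hnotmem), List.erase_cons_head]
  rw [show pre ++ a :: suf = (pre ++ [a]) ++ suf by simp,
      List.drop_left' (by simp)]

theorem solve_spec : Claim_equal_solve := by
  intro s _ hpre
  have hne : s.toList ≠ [] := by
    intro h
    apply hpre
    calc s = String.ofList s.toList := (String.ofList_toList (s := s)).symm
    _ = "" := by rw [h]
  unfold Spec_solve solve solve_alt
  obtain ⟨x, t, hxt⟩ := List.exists_cons_of_ne_nil hne
  rw [hxt]
  rw [List.map_cons, PySem.List.min?_id_cons, PySem.List.min?_id_cons]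
  rw [foldl_min_map]
  set m := t.foldl min x with hm
  have hofNat : Char.ofNat ((m.toNat : Int)).toNat = m := by
    rw [Int.toNat_natCast]; exact Char.ofNat_toNat m
  simp only []
  rw [hofNat]
  have hmem : m ∈ x :: t := by
    have := PySem.List.min?_mem (key := fun c => c) (xs := x :: t) (m := m)
      (by rw [PySem.List.min?_id_cons])
    exact this
  obtain ⟨i, hi⟩ := (PySem.List.index?_isSome_iff (xs := x :: t) (v := m)).2 hmem |> fun h =>
    Option.isSome_iff_exists.1 h
  rw [hi]
  rw [loop_false, List.nil_append]
  show String.ofList (m :: ' ' :: (x :: t).erase m) =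
       String.ofList (m :: ' ' :: (PySem.List.slice (x :: t) none (some (i : Int)) ++
                                   PySem.List.slice (x :: t) (some ((i : Int) + 1)) none))
  rw [slices_eq_erase _ _ _ hi]
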